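-- pv_equiv track=rewrite | github.com/MichaelMoroz/slang-splat | utility/utility.py | _prefix_level_layout
-- ===== SOURCE A (Python) =====
-- _PREFIX_BLOCK_SIZE = 512
--
-- def _ceil_div(value: int, divisor: int) -> int:
--     return (value + divisor - 1) // divisor
--
-- def _prefix_level_layout(max_count: int) -> list[tuple[int, int, int]]:
--     count = max(int(max_count), 1)
--     scratch_offset = 0
--     layout: list[tuple[int, int, int]] = []
--     while True:
--         block_count = max(_ceil_div(count, _PREFIX_BLOCK_SIZE), 1)
--         layout.append((count, block_count, scratch_offset))
--         if block_count <= 1: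
--             return layout
--         scratch_offset += block_count
--         count = block_count
-- ===== SOURCE B (Python) =====
-- _PREFIX_BLOCK_SIZE = 512
--
-- def _ceil_div(value: int, divisor: int) -> int:
--     return (value + divisor - 1) // divisor
--
-- def _prefix_level_layout(max_count: int) -> list[tuple[int, int, int]]:
--     # Closed form: level i holds count ceil(base / 512**i), because nested ceil
--     # divisions collapse: ceil(ceil(x/a)/b) == ceil(x/(a*b)).  So instead of
--     # threading the recurrence, precompute the powers of 512 that span base and
--     # divide base by each power directly.
--     base = max(int(max_count), 1)
--     powers = [1]
--     while base > powers[-1] * _PREFIX_BLOCK_SIZE: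
--         powers.append(powers[-1] * _PREFIX_BLOCK_SIZE)
--     layout = []
--     offset = 0
--     for p in powers:
--         count = _ceil_div(base, p)
--         block = _ceil_div(base, p * _PREFIX_BLOCK_SIZE) if base > p * _PREFIX_BLOCK_SIZE else 1
--         layout.append((count, block, offset))
--         offset += block
--     return layout
-- ===== Notes on version B (the rewrite author's own statement) =====
-- stated objective: alternative
-- what changed: A threads the recurrence count -> ceil(count/B) with the block size B together with a running scratch offset through one while-loop; B instead first collects the powers of the block size spanning the base and then computes every level's count directly by the closed form ceil(base/B^i), valid because nested ceil-divisions collapse (ceil(ceil(x/a)/b) = ceil(x/(a*b))), marking the final level by base <= B^(i+1).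
import Mathlib
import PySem

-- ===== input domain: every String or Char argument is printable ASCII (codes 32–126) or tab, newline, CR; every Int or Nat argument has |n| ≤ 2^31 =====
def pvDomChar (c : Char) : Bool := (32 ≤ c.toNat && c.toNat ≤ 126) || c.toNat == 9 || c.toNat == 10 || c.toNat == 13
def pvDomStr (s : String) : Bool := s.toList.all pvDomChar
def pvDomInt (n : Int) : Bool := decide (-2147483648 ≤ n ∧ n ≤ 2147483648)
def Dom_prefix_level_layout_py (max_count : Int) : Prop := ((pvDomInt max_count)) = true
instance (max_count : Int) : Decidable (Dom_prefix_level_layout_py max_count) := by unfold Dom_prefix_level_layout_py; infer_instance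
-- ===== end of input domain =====

-- B replaces A's iterated recurrence (each level's count is the previous level's block count) by a closed form:
-- level i's count is ceil(base / 512^i), valid because nested ceil-divisions collapse; alternative decomposition,
-- same cost; return value proved identical.

-- ===== PORT A =====
-- _ceil_div(value, divisor) = (value + divisor - 1) // divisor  (shared module helper, used by both ports)
def ceil_div_py (value divisor : Int) : Int :=
  PySem.Int.floordiv (value + divisor - 1) divisor

-- termination measure for A's while-loop: once block_count > 1, count ≥ 513 and block_count < count
theorem pv_bc_lt (count : Int) (h : ¬ max (ceil_div_py count 512) 1 ≤ 1) :
    (max (ceil_div_py count 512) 1).toNat < count.toNat := by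
  unfold ceil_div_py at *
  have h2 : 2 ≤ PySem.Int.floordiv (count + 512 - 1) 512 := by omega
  have hle := (PySem.Int.le_floordiv_iff_mul_le (a := count + 512 - 1) (b := 512) (q := 2) (by omega)).mp h2
  rw [PySem.Int.floordiv_eq_ediv_of_pos (by omega)] at *
  omega

-- the 'while True' loop of A, threading (count, scratch_offset)
def prefixLoopA (count scratch_offset : Int) : List (Int × Int × Int) :=
  let block_count := max (ceil_div_py count 512) 1
  if block_count ≤ 1 then [(count, block_count, scratch_offset)]
  else (count, block_count, scratch_offset) :: prefixLoopA block_count (scratch_offset + block_count)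
termination_by count.toNat
decreasing_by exact pv_bc_lt count (by assumption)

def prefix_level_layout_py (max_count : Int) : List (Int × Int × Int) :=
  prefixLoopA (max max_count 1) 0

-- ===== PORT B =====
-- B's pass 1: 'powers = [1]; while base > powers[-1] * 512: powers.append(powers[-1] * 512)'
def powersB (base p : Int) (hp : 0 < p) : List Int :=
  if base > p * 512 then p :: powersB base (p * 512) (by positivity) else [p]
termination_by (base - p).toNat
decreasing_by omega

def prefix_level_layout_py_alt (max_count : Int) : List (Int × Int × Int) :=
  let base := max max_count 1
  let powers := powersB base 1 (by norm_num)
  -- 'layout = []; offset = 0; for p in powers: count = ...; block = ...; layout.append(...); offset += block'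
  (powers.foldl (fun (st : List (Int × Int × Int) × Int) p =>
      let count := ceil_div_py base p
      let block := if base > p * 512 then ceil_div_py base (p * 512) else 1
      (st.1 ++ [(count, block, st.2)], st.2 + block)) ([], 0)).1

-- ===== PRECONDITION & SPEC =====
def Spec_prefix_level_layout_py (max_count : Int) (out : List (Int × Int × Int)) : Prop := out = prefix_level_layout_py_alt max_count
instance (max_count : Int) (out : List (Int × Int × Int)) : Decidable (Spec_prefix_level_layout_py max_count out) := by unfold Spec_prefix_level_layout_py; infer_instance

-- ===== CLAIM (what is proved, stated in full; the proofs are below) =====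
def Claim_equal_prefix_level_layout_py : Prop := ∀ (max_count : Int), Dom_prefix_level_layout_py max_count → Spec_prefix_level_layout_py max_count (prefix_level_layout_py max_count)

-- ===== LEMMAS AND PROOFS =====

-- ceil_div through ediv, for a positive divisor
theorem ceil_div_eq (x p : Int) (hp : 0 < p) : ceil_div_py x p = (x - 1) / p + 1 := by
  unfold ceil_div_py
  rw [PySem.Int.floordiv_eq_ediv_of_pos hp]
  have : x + p - 1 = (x - 1) + 1 * p := by ring
  rw [this, Int.add_mul_ediv_right _ _ (by omega)]

-- nested ceil-divisions collapse: ceil(ceil(x/p)/512) = ceil(x/(p*512))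
theorem ceil_div_collapse (x p : Int) (hp : 0 < p) :
    ceil_div_py (ceil_div_py x p) 512 = ceil_div_py x (p * 512) := by
  rw [ceil_div_eq x p hp, ceil_div_eq _ 512 (by omega), ceil_div_eq x (p * 512) (by positivity)]
  have : (x - 1) / p + 1 - 1 = (x - 1) / p := by ring
  rw [this, Int.ediv_ediv_of_nonneg (by omega : (0:Int) ≤ p)]

-- the continuation condition in both phrasings: ceil(x/p) > 512 ↔ x > p*512
theorem ceil_div_gt (x p : Int) (hp : 0 < p) : 512 < ceil_div_py x p ↔ p * 512 < x := by
  rw [ceil_div_eq x p hp]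
  constructor
  · intro h
    have h512 : 512 ≤ (x - 1) / p := by omega
    have := Int.le_ediv_iff_mul_le hp |>.mp h512
    nlinarith
  · intro h
    have : 512 ≤ (x - 1) / p := (Int.le_ediv_iff_mul_le hp).mpr (by nlinarith)
    omega

-- the chain of level counts of A, as a proof-side object
theorem pv_chain_lt (c : Int) (h : 512 < c) : (ceil_div_py c 512).toNat < c.toNat := by
  unfold ceil_div_py
  rw [PySem.Int.floordiv_eq_ediv_of_pos (by omega)]
  omega

def countsChainB (c : Int) : List Int :=
  if hgt : 512 < c then c :: countsChainB (ceil_div_py c 512) else [c]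
termination_by c.toNat
decreasing_by exact pv_chain_lt c hgt

-- combine l s = the layout a chain of counts l denotes, starting at scratch offset s
def combineL : List Int → Int → List (Int × Int × Int)
  | [], _ => []
  | [c], s => [(c, 1, s)]
  | c :: c' :: rest, s => (c, c', s) :: combineL (c' :: rest) (s + c')

-- countsChainB always starts with its argument
theorem countsChainB_cons (c : Int) : ∃ t, countsChainB c = c :: t := by
  unfold countsChainB
  split
  · exact ⟨_, rfl⟩
  · exact ⟨[], rfl⟩

-- A's loop output = the combined chain, for count ≥ 1
theorem loopA_eq_combine (count : Int) (hc : 1 ≤ count) :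
    ∀ s : Int, prefixLoopA count s = combineL (countsChainB count) s := by
  induction hn : count.toNat using Nat.strong_induction_on generalizing count with
  | _ n ih =>
      intro s
      by_cases h512 : 512 < count
      · have hediv : ceil_div_py count 512 = (count + 512 - 1) / 512 := by
          unfold ceil_div_py; exact PySem.Int.floordiv_eq_ediv_of_pos (by omega)
        have h2 : 2 ≤ ceil_div_py count 512 := by omega
        have hmax : max (ceil_div_py count 512) 1 = ceil_div_py count 512 := by omega
        have hlt : (ceil_div_py count 512).toNat < count.toNat := pv_chain_lt count h512
        obtain ⟨t, hchain⟩ := countsChainB_cons (ceil_div_py count 512)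
        rw [prefixLoopA]
        simp only [hmax]
        rw [if_neg (by omega)]
        rw [ih (ceil_div_py count 512).toNat (by omega) (ceil_div_py count 512) (by omega) rfl]
        conv_rhs => rw [countsChainB]
        rw [dif_pos h512, hchain, combineL, ← hchain]
      · have h1 : ceil_div_py count 512 = 1 := by
          have hediv : ceil_div_py count 512 = (count + 512 - 1) / 512 := by
            unfold ceil_div_py; exact PySem.Int.floordiv_eq_ediv_of_pos (by omega)
          omega
        rw [prefixLoopA]
        simp only [h1]
        rw [if_pos (by omega), countsChainB, dif_neg h512]
        simp [combineL]

-- the body of B's for-loop, with the accumulator made explicit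
def goB (base : Int) : List Int → Int → List (Int × Int × Int)
  | [], _ => []
  | p :: ps, s =>
      let block := if base > p * 512 then ceil_div_py base (p * 512) else 1
      (ceil_div_py base p, block, s) :: goB base ps (s + block)

theorem foldB_eq_goB (base : Int) (ps : List Int) :
    ∀ (acc : List (Int × Int × Int)) (s : Int),
      (ps.foldl (fun (st : List (Int × Int × Int) × Int) p =>
          let count := ceil_div_py base p
          let block := if base > p * 512 then ceil_div_py base (p * 512) else 1
          (st.1 ++ [(count, block, st.2)], st.2 + block)) (acc, s)).1
        = acc ++ goB base ps s := by
  induction ps with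
  | nil => intro acc s; simp [goB]
  | cons p ps ih =>
      intro acc s
      simp only [List.foldl_cons, goB, ih]
      simp

-- B's per-level closed form over the powers = A's combined chain
theorem goB_eq_combine (base : Int) (hb : 1 ≤ base) (p : Int) (hp : 0 < p) :
    ∀ s : Int, goB base (powersB base p hp) s = combineL (countsChainB (ceil_div_py base p)) s := by
  induction hn : (base - p).toNat using Nat.strong_induction_on generalizing p with
  | _ n ih =>
      intro s
      have hcond := ceil_div_gt base p hp
      by_cases hgt : p * 512 < base
      · have hc512 : 512 < ceil_div_py base p := hcond.mpr hgt
        have hcol := ceil_div_collapse base p hp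
        obtain ⟨t, hchain⟩ := countsChainB_cons (ceil_div_py base (p * 512))
        rw [powersB, if_pos (by omega), goB]
        rw [ih (base - p * 512).toNat (by omega) (p * 512) (by positivity) rfl]
        conv_rhs => rw [countsChainB, dif_pos hc512]
        rw [hcol, hchain, combineL, ← hchain]
        simp only [if_pos (by omega : base > p * 512)]
      · have hc : ¬ 512 < ceil_div_py base p := fun h => hgt (hcond.mp h)
        rw [powersB, if_neg (by omega), countsChainB, dif_neg hc]
        simp [goB, combineL, hgt]

-- ===== VERDICT (by name: the statement is the Claim_ definition above) =====
theorem prefix_level_layout_py_spec : Claim_equal_prefix_level_layout_py := by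
  intro max_count _
  unfold Spec_prefix_level_layout_py prefix_level_layout_py prefix_level_layout_py_alt
  rw [foldB_eq_goB, List.nil_append,
      goB_eq_combine (max max_count 1) (by omega) 1 (by norm_num) 0]
  have h1 : ceil_div_py (max max_count 1) 1 = max max_count 1 := by
    rw [ceil_div_eq _ 1 (by norm_num)]; omega
  rw [h1, loopA_eq_combine (max max_count 1) (by omega) 0]
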